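-- pv_equiv track=rewrite | github.com/jwmcoding/EC2_Document_Pipeline | src/parsers/table_formatter.py | deduplicate_merged_cells
-- ===== SOURCE A (Python) =====
-- from typing import List, Optional
--
-- def deduplicate_merged_cells(row_cells: List[str]) -> List[str]:
--     """
--     Remove duplicate values from adjacent merged cells.
--
--     DOCX and PDF tables can have merged cells that appear as duplicated
--     values in adjacent positions. This function replaces duplicates with
--     empty strings to maintain column structure.
--
--     Args:
--         row_cells: List of cell values from a table row
--
--     Returns:
--         List with duplicate adjacent values replaced by empty strings
--
--     Example:
--         Input:  ["Total", "Total", "Total", "$500"]  (merged cell spanning 3 cols)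
--         Output: ["Total", "", "", "$500"]
--     """
--     if not row_cells:
--         return []
--
--     result = []
--     prev_cell = None
--
--     for cell in row_cells:
--         cell_text = str(cell).strip() if cell else ""
--
--         # If same as previous cell and not empty, it's likely a merged cell
--         if cell_text == prev_cell and cell_text:
--             result.append("")  # Empty for merged continuation
--         else:
--             result.append(cell_text)
--
--         prev_cell = cell_text
--
--     return result
-- ===== SOURCE B (Python) =====
-- from typing import List
-- from itertools import groupby
--
-- def deduplicate_merged_cells(row_cells: List[str]) -> List[str]:
--     normalized = [str(cell).strip() if cell else "" for cell in row_cells]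
--     out = []
--     for key, group in groupby(normalized):
--         run = sum(1 for _ in group)
--         out.append(key)
--         out.extend([""] * (run - 1))
--     return out
-- ===== Notes on version B (the rewrite author's own statement) =====
-- stated objective: idiomatic
-- what changed: B normalizes the whole row in one comprehension, then uses itertools.groupby over the normalized list, emitting each run's key once followed by blanks, instead of A's single loop carrying prev_cell state and per-element comparisons.
import Mathlib
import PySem

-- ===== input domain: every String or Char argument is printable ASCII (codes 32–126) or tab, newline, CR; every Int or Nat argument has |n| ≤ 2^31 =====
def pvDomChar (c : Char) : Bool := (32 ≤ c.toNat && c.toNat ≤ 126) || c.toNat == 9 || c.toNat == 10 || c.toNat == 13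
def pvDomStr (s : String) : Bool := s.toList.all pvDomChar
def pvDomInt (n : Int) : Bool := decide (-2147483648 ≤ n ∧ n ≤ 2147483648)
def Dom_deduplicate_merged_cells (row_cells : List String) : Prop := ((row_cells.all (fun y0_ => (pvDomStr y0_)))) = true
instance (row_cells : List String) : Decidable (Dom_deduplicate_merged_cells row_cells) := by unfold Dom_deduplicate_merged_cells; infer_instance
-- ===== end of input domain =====

-- B normalizes the row in one pass, then groups equal adjacent values (itertools.groupby),
-- emitting each run's key once followed by blanks; same result, more idiomatic decomposition.

-- ===== PORT A =====
-- one loop step of A: normalize the cell, compare with prev, append, update prev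
def pvStepA (st : List String × Option String) (cell : String) : List String × Option String :=
  let ct := if cell ≠ "" then PySem.Str.strip cell else ""
  let res := if st.2 = some ct ∧ ct ≠ "" then st.1 ++ [""] else st.1 ++ [ct]
  (res, some ct)

def deduplicate_merged_cells (row_cells : List String) : List String :=
  if row_cells = [] then []
  else (row_cells.foldl pvStepA ([], none)).1

-- ===== PORT B =====
-- B's normalization: str(cell).strip() if cell else ""
def pvNorm (cell : String) : String := if cell ≠ "" then PySem.Str.strip cell else ""

-- groupby over the normalized list: emit "" while the run of x continues, else start a new run
def pvEmit (x : String) : List String → List String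
  | [] => []
  | y :: ys => if y = x then "" :: pvEmit x ys else y :: pvEmit y ys

def deduplicate_merged_cells_alt (row_cells : List String) : List String :=
  match row_cells.map pvNorm with
  | [] => []
  | x :: xs => x :: pvEmit x xs

-- ===== PRECONDITION & SPEC =====
def Spec_deduplicate_merged_cells (row_cells : List String) (out : List String) : Prop := out = deduplicate_merged_cells_alt row_cells
instance (row_cells : List String) (out : List String) : Decidable (Spec_deduplicate_merged_cells row_cells out) := by unfold Spec_deduplicate_merged_cells; infer_instance

-- ===== CLAIM (what is proved, stated in full; the proofs are below) =====
def Claim_equal_deduplicate_merged_cells : Prop := ∀ (row_cells : List String), Dom_deduplicate_merged_cells row_cells → Spec_deduplicate_merged_cells row_cells (deduplicate_merged_cells row_cells)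

-- ===== LEMMAS AND PROOFS =====
theorem foldA_emit (l : List String) : ∀ (res : List String) (p : String),
    (l.foldl pvStepA (res, some p)).1 = res ++ pvEmit p (l.map pvNorm) := by
  induction l with
  | nil => intro res p; simp [pvEmit]
  | cons c cs ih =>
    intro res p
    have hstep : pvStepA (res, some p) c =
        (res ++ [if pvNorm c = p then "" else pvNorm c], some (pvNorm c)) := by
      show ((if (some p : Option String) = some (pvNorm c) ∧ pvNorm c ≠ "" then
              res ++ [""] else res ++ [pvNorm c]), some (pvNorm c)) = _
      by_cases h : pvNorm c = p
      · subst h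
        by_cases he : pvNorm c = "" <;> simp [he]
      · simp [h, Ne.symm h]
    rw [List.foldl_cons, hstep, ih, List.map_cons]
    by_cases h : pvNorm c = p
    · simp [pvEmit, h, List.append_assoc]
    · simp [pvEmit, h, List.append_assoc]

theorem deduplicate_merged_cells_eq (row_cells : List String) :
    deduplicate_merged_cells row_cells = deduplicate_merged_cells_alt row_cells := by
  cases row_cells with
  | nil => rfl
  | cons c cs =>
    simp only [deduplicate_merged_cells, deduplicate_merged_cells_alt, List.foldl_cons,
      List.map_cons, if_neg (List.cons_ne_nil c cs)]
    have hstep : pvStepA ([], none) c = ([pvNorm c], some (pvNorm c)) := by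
      simp [pvStepA, pvNorm]
    rw [hstep, foldA_emit]
    simp

-- ===== VERDICT (by name: the statement is the Claim_ definition above) =====
theorem deduplicate_merged_cells_spec : Claim_equal_deduplicate_merged_cells := by
  intro row_cells _
  exact (deduplicate_merged_cells_eq row_cells)
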